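-- pv_equiv track=rewrite | github.com/Hohichh/BSUIR | Second course/sem4/AOIS/decim_to_binary_straight.py | int_straight_code
-- ===== SOURCE A (Python) =====
-- def int_straight_code(decimal_number):
--     if decimal_number == 0:
--         return '0'*32
--
--     is_negative = False
--     if decimal_number < 0:
--         is_negative = True
--         decimal_number = abs(decimal_number)
--
--     binary_number = ''
--     while decimal_number > 0:
--         remainder = decimal_number % 2
--         binary_number = str(remainder) + binary_number
--         decimal_number //= 2
--
--     binary_number = binary_number.rjust(32, '0')
--
--     if is_negative:
--         binary_number = '1' + binary_number[1:]
--
--     return binary_number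
-- ===== SOURCE B (Python) =====
-- def int_straight_code(decimal_number):
--     m = abs(decimal_number)
--     width = max(m.bit_length(), 32)
--     bits = ''.join('1' if (m >> (width - 1 - i)) & 1 else '0' for i in range(width))
--     if decimal_number < 0:
--         bits = '1' + bits[1:]
--     return bits
-- ===== Notes on version B (the rewrite author's own statement) =====
-- stated objective: alternative
-- what changed: Replaces A's repeated divide-by-2/string-prepend loop plus rjust padding and a zero special case with a single MSB-first shift-and-mask scan over width = max(bit_length, 32) fixed positions, whose general path also covers 0.
import Mathlib
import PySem

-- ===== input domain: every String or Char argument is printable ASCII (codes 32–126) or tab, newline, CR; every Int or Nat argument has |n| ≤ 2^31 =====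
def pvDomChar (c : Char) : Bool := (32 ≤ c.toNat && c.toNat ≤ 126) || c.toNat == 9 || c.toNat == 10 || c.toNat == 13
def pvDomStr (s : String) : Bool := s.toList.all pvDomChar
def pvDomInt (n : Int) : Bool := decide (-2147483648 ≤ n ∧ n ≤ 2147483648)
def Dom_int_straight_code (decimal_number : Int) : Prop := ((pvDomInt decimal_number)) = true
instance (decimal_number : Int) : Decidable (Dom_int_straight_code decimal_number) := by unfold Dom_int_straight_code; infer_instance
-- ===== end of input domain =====

-- B replaces A's divide-by-2/prepend loop with a fixed-width MSB-first shift-and-mask scan (alternative decomposition, same cost).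

-- ===== PORT A =====
-- the 'while decimal_number > 0' loop: prepend str(n % 2), n //= 2
def pvALoop (n : Int) (acc : List Char) : List Char :=
  if h : n > 0 then
    pvALoop (PySem.Int.floordiv n 2) (PySem.Int.toChars (PySem.Int.mod n 2) ++ acc)
  else acc
termination_by n.toNat
decreasing_by
  rw [PySem.Int.floordiv_eq_ediv_of_pos (by omega : (0:Int) < 2)]
  omega

def int_straight_code (decimal_number : Int) : String :=
  if decimal_number == 0 then String.ofList (List.replicate 32 '0')
  else
    let is_negative := decimal_number < 0
    let n := if decimal_number < 0 then |decimal_number| else decimal_number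
    let binary_number := pvALoop n []
    -- .rjust(32, '0') on a nonempty digit string: left-pad with '0' to length 32 (exact)
    let binary_number := List.replicate (32 - binary_number.length) '0' ++ binary_number
    let binary_number :=
      if is_negative then '1' :: PySem.List.slice binary_number (some 1) none
      else binary_number
    String.ofList binary_number

-- ===== PORT B =====
def int_straight_code_alt (decimal_number : Int) : String :=
  let m := |decimal_number|
  let width := max (PySem.Int.bitLength m) 32
  -- ''.join('1' if (m >> (width-1-i)) & 1 else '0' for i in range(width))
  let bits := (List.range width).map
    (fun i => if PySem.Int.band (m >>> (width - 1 - i)) 1 == 1 then '1' else '0')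
  if decimal_number < 0 then String.ofList ('1' :: PySem.List.slice bits (some 1) none)
  else String.ofList bits

-- ===== PRECONDITION & SPEC =====
def Spec_int_straight_code (decimal_number : Int) (out : String) : Prop := out = int_straight_code_alt decimal_number
instance (decimal_number : Int) (out : String) : Decidable (Spec_int_straight_code decimal_number out) := by unfold Spec_int_straight_code; infer_instance

-- ===== CLAIM (what is proved, stated in full; the proofs are below) =====
def Claim_equal_int_straight_code : Prop := ∀ (decimal_number : Int), Dom_int_straight_code decimal_number → Spec_int_straight_code decimal_number (int_straight_code decimal_number)

-- ===== LEMMAS AND PROOFS =====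

-- MSB-first binary digits of a natural number (A's loop builds exactly this)
def pvBits (m : Nat) : List Char :=
  if h : m = 0 then [] else pvBits (m / 2) ++ [if m % 2 = 1 then '1' else '0']
decreasing_by exact Nat.div_lt_self (Nat.pos_of_ne_zero h) (by omega)

theorem pvALoop_eq_bits (m : Nat) (acc : List Char) :
    pvALoop (m : Int) acc = pvBits m ++ acc := by
  induction m using Nat.strong_induction_on generalizing acc with
  | _ m ih =>
    rw [pvALoop, pvBits]
    by_cases h0 : m = 0
    · simp [h0]
    · have hpos : (0:Int) < (m : Int) := by exact_mod_cast Nat.pos_of_ne_zero h0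
      rw [dif_pos hpos, dif_neg h0]
      have hdiv : PySem.Int.floordiv (m : Int) 2 = ((m / 2 : Nat) : Int) :=
        PySem.Int.floordiv_natCast m 2
      have hmod : PySem.Int.mod (m : Int) 2 = ((m % 2 : Nat) : Int) :=
        PySem.Int.mod_natCast m 2
      rw [hdiv, hmod, ih (m / 2) (Nat.div_lt_self (Nat.pos_of_ne_zero h0) (by omega))]
      rcases Nat.mod_two_eq_zero_or_one m with h2 | h2 <;>
        simp [h2, PySem.Int.toChars] <;> rfl

theorem pvBits_length (m : Nat) : (pvBits m).length = PySem.Int.bitLength (m : Int) := by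
  induction m using Nat.strong_induction_on with
  | _ m ih =>
    rw [pvBits]
    by_cases h0 : m = 0
    · simp [h0]
    · rw [dif_neg h0]
      rw [PySem.Int.bitLength_natCast (Nat.pos_of_ne_zero h0)]
      simp [ih (m / 2) (Nat.div_lt_self (Nat.pos_of_ne_zero h0) (by omega))]

-- B's mask scan over List.range w, for a natural magnitude
def pvMask (m w : Nat) : List Char :=
  (List.range w).map (fun i => if (m >>> (w - 1 - i)) &&& 1 == 1 then '1' else '0')

theorem pvMask_succ (m w : Nat) :
    pvMask m (w + 1) = pvMask (m / 2) w ++ [if m % 2 = 1 then '1' else '0'] := by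
  unfold pvMask
  rw [List.range_succ, List.map_append]
  congr 1
  · apply List.map_congr_left
    intro i hi
    have hi' : i < w := List.mem_range.mp hi
    have hs : w + 1 - 1 - i = (w - 1 - i) + 1 := by omega
    have : m >>> ((w - 1 - i) + 1) = (m / 2) >>> (w - 1 - i) := by
      rw [Nat.add_comm, Nat.shiftRight_add, Nat.shiftRight_one]
    rw [hs, this]
  · rcases Nat.mod_two_eq_zero_or_one m with h2 | h2 <;> simp [Nat.and_one_is_mod, h2]

theorem pvMask_eq_pad (w m : Nat) (h : (pvBits m).length ≤ w) :
    pvMask m w = List.replicate (w - (pvBits m).length) '0' ++ pvBits m := by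
  induction w generalizing m with
  | zero =>
    have hb : pvBits m = [] := List.eq_nil_of_length_eq_zero (by omega)
    simp [pvMask, hb]
  | succ w ih =>
    rw [pvMask_succ]
    by_cases h0 : m = 0
    · subst h0
      have hb0 : pvBits 0 = [] := by rw [pvBits]; simp
      have : (0:Nat) / 2 = 0 := rfl
      rw [this, ih 0 (by simp [hb0]), hb0]
      simp [List.replicate_succ']
    · have hrec : pvBits m = pvBits (m / 2) ++ [if m % 2 = 1 then '1' else '0'] := by
        rw [pvBits]; rw [dif_neg h0]
      have hlen : (pvBits m).length = (pvBits (m / 2)).length + 1 := by rw [hrec]; simp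
      have hcnt : w + 1 - (pvBits m).length = w - (pvBits (m / 2)).length := by omega
      rw [hcnt, hrec, ih (m / 2) (by omega), List.append_assoc]

-- the magnitude strings agree: A's rjust-padded loop output = B's mask scan
theorem pad_eq_mask (m : Nat) :
    List.replicate (32 - (pvALoop (m : Int) []).length) '0' ++ pvALoop (m : Int) []
      = pvMask m (max (PySem.Int.bitLength (m : Int)) 32) := by
  rw [pvALoop_eq_bits m []]
  simp only [List.append_nil]
  rw [pvMask_eq_pad _ m (by rw [pvBits_length]; omega)]
  congr 1
  rw [pvBits_length]
  congr 1
  omega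

theorem int_shiftRight_natCast (m k : Nat) : ((m : Int) >>> k) = ((m >>> k : Nat) : Int) := rfl

theorem alt_mask (m w : Nat) :
    (List.range w).map
      (fun i => if PySem.Int.band ((m : Int) >>> (w - 1 - i)) 1 == 1 then '1' else '0')
      = pvMask m w := by
  unfold pvMask
  apply List.map_congr_left
  intro i _
  rw [int_shiftRight_natCast]
  rw [show ((1:Int)) = ((1:Nat):Int) by rfl, PySem.Int.band_natCast]
  by_cases hb : (m >>> (w - 1 - i)) &&& 1 = 1
  · simp [hb]
  · have : ((m >>> (w - 1 - i)) &&& 1 : Nat) = 0 := by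
      have := Nat.and_one_is_mod (m >>> (w - 1 - i))
      omega
    simp [this]

-- ===== VERDICT (by name: the statement is the Claim_ definition above) =====
theorem int_straight_code_spec : Claim_equal_int_straight_code := by
  intro d _
  by_cases h0 : d = 0
  · subst h0
    unfold Spec_int_straight_code
    decide
  · unfold Spec_int_straight_code int_straight_code int_straight_code_alt
    rw [if_neg (by simpa using h0)]
    set m : Nat := d.natAbs with hm
    have habs : |d| = (m : Int) := Int.abs_eq_natAbs d
    rw [habs]
    have hn : (if d < 0 then (m : Int) else d) = (m : Int) := by
      by_cases hneg : d < 0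
      · rw [if_pos hneg]
      · rw [if_neg hneg, hm]; omega
    rw [hn]
    dsimp only
    rw [alt_mask m (max (PySem.Int.bitLength (m : Int)) 32), ← pad_eq_mask m]
    by_cases hneg : d < 0 <;> simp [hneg]
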